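-- pv_equiv track=rewrite | github.com/regularpooria/BugsInPy | framework/bin/replace_code.py | find_function_end_regex
-- ===== SOURCE A (Python) =====
-- def find_function_end_regex(lines, start_line, function_indent):
--     """
--     Helper function to find the end of a function given its start line and indentation.
--     """
--     # Find the function end
--     end_line = start_line + 1
--     while end_line < len(lines):
--         line = lines[end_line]
--         # Skip empty lines and comments
--         if line.strip() == "" or line.strip().startswith("#"):
--             end_line += 1
--             continue
--
--         # Check indentation
--         current_indent = len(line) - len(line.lstrip())
--
--         # If we find a line with same or less indentation that's not empty/comment, we've found the end
--         if current_indent <= function_indent and line.strip():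
--             break
--
--         end_line += 1
--
--     # Calculate character positions
--     start_pos = sum(len(lines[i]) for i in range(start_line))
--     end_pos = sum(len(lines[i]) for i in range(end_line))
--
--     return start_pos, end_pos, function_indent
-- ===== SOURCE B (Python) =====
-- def find_function_end_regex(lines, start_line, function_indent):
--     """
--     Helper function to find the end of a function given its start line and indentation.
--     Single forward pass: char positions are accumulated while walking the lines,
--     instead of being recomputed with two trailing sum() scans.
--     """
--     pos = 0
--     for i, line in enumerate(lines):
--         if i < start_line:
--             pos += len(line)
--             continue
--         if i == start_line:
--             start_pos = pos
--             pos += len(line)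
--             continue
--         stripped = line.strip()
--         if stripped and not stripped.startswith("#"):
--             if len(line) - len(line.lstrip()) <= function_indent:
--                 break
--         pos += len(line)
--     return start_pos, pos, function_indent
-- ===== Notes on version B (the rewrite author's own statement) =====
-- stated objective: alternative
-- what changed: A scans for the end line and then recomputes start_pos and end_pos with two separate sum() passes over line lengths; B makes one accumulating forward pass over enumerate(lines) that maintains the running char position and records start_pos/end_pos on the fly.
-- outside the precondition, e.g. on find_function_end_regex(['#c', '  a', 'b'], -4, 0): A returns (0, 0, 0), B raises UnboundLocalError
import Mathlib
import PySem

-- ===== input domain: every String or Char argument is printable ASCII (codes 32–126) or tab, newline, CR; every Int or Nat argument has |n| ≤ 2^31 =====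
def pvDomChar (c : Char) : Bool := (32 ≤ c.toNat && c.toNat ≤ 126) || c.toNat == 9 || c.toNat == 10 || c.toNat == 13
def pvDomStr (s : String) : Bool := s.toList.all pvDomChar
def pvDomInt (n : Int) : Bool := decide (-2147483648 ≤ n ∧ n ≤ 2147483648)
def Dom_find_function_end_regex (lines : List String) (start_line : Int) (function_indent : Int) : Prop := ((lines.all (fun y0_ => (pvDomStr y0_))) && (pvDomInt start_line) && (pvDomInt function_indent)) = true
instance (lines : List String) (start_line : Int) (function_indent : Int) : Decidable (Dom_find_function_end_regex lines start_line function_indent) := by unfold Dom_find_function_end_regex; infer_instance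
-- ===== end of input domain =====

-- B folds A's two trailing sum() re-scans into a single accumulating forward pass (alternative decomposition, same asymptotic cost).

-- ===== PORT A =====
-- A's while loop; fuel = number of remaining loop iterations (the loop increments end_line towards
-- len(lines)). lines[end_line] is ported as pyGetD: under Pre_ the index is always in range
-- (0 < end_line, and the loop guard gives end_line < len(lines)); Python raises only outside Pre_.
def pvAStep (lines : List String) (function_indent : Int) : Nat → Int → Int
  | 0, end_line => end_line
  | fuel+1, end_line =>
    if end_line < PySem.List.len lines then
      let line := PySem.List.pyGetD lines end_line ""
      if PySem.Str.strip line = "" ∨ PySem.Str.startswith (PySem.Str.strip line) "#" = true then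
        pvAStep lines function_indent fuel (end_line + 1)
      else
        if PySem.Str.len line - PySem.Str.len (PySem.Str.lstrip line) ≤ function_indent ∧
           PySem.Str.strip line ≠ "" then
          end_line
        else
          pvAStep lines function_indent fuel (end_line + 1)
    else end_line

-- sum(len(lines[i]) for i in range(m))
def pvASum (lines : List String) (m : Int) : Int :=
  (PySem.List.pyRange 0 m 1).foldl (fun acc i => acc + PySem.Str.len (PySem.List.pyGetD lines i "")) 0

def find_function_end_regex (lines : List String) (start_line : Int) (function_indent : Int) : Int × Int × Int :=
  let end_line := pvAStep lines function_indent (PySem.List.len lines - (start_line + 1)).toNat (start_line + 1)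
  (pvASum lines start_line, pvASum lines end_line, function_indent)

-- ===== PORT B =====
-- B's single for-loop over enumerate(lines), carrying (start_pos, pos) as the accumulator.
-- In Python start_pos is unassigned until i == start_line; under Pre_ it is always assigned
-- before it is read (0 below is a dummy initial value, only reachable outside Pre_).
def pvBLoop (start_line : Int) (function_indent : Int) : List (Int × String) → Int → Int → Int × Int
  | [], start_pos, pos => (start_pos, pos)
  | (i, line) :: rest, start_pos, pos =>
    if i < start_line then
      pvBLoop start_line function_indent rest start_pos (pos + PySem.Str.len line)
    else if i = start_line then
      pvBLoop start_line function_indent rest pos (pos + PySem.Str.len line)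
    else
      if PySem.Str.strip line ≠ "" ∧ PySem.Str.startswith (PySem.Str.strip line) "#" = false then
        if PySem.Str.len line - PySem.Str.len (PySem.Str.lstrip line) ≤ function_indent then
          (start_pos, pos)
        else
          pvBLoop start_line function_indent rest start_pos (pos + PySem.Str.len line)
      else
        pvBLoop start_line function_indent rest start_pos (pos + PySem.Str.len line)

def find_function_end_regex_alt (lines : List String) (start_line : Int) (function_indent : Int) : Int × Int × Int :=
  let r := pvBLoop start_line function_indent (PySem.List.enumerate lines 0) 0 0
  (r.1, r.2, function_indent)

-- ===== PRECONDITION & SPEC =====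
-- Pre_ restricts to the function's natural domain: a real line index 0 ≤ start_line < len(lines).
-- For start_line ≥ len(lines) A raises IndexError in the end_pos sum; for negative start_line
-- (a line number outside the natural domain) A's negative-index wraparound in lines[end_line] is
-- accidental and A raises IndexError once start_line + 1 < -len(lines).
def Pre_find_function_end_regex (lines : List String) (start_line : Int) (function_indent : Int) : Prop :=
  0 ≤ start_line ∧ start_line < PySem.List.len lines
instance (lines : List String) (start_line : Int) (function_indent : Int) : Decidable (Pre_find_function_end_regex lines start_line function_indent) := by unfold Pre_find_function_end_regex; infer_instance

def pvWitness_find_function_end_regex : List String × Int × Int :=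
  (["def f():", "    return 1", "x = 2"], 0, 0)

def Spec_find_function_end_regex (lines : List String) (start_line : Int) (function_indent : Int) (out : Int × Int × Int) : Prop := out = find_function_end_regex_alt lines start_line function_indent
instance (lines : List String) (start_line : Int) (function_indent : Int) (out : Int × Int × Int) : Decidable (Spec_find_function_end_regex lines start_line function_indent out) := by unfold Spec_find_function_end_regex; infer_instance

-- ===== CLAIM (what is proved, stated in full; the proofs are below) =====
def Claim_equal_find_function_end_regex : Prop := ∀ (lines : List String) (start_line : Int) (function_indent : Int), Dom_find_function_end_regex lines start_line function_indent → Pre_find_function_end_regex lines start_line function_indent → Spec_find_function_end_regex lines start_line function_indent (find_function_end_regex lines start_line function_indent)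

-- ===== LEMMAS AND PROOFS =====

-- Character count of a block of lines.
def pvSum (xs : List String) : Int := (xs.map PySem.Str.len).sum

theorem pvSum_nil : pvSum [] = 0 := rfl

theorem pvSum_cons (x : String) (xs : List String) :
    pvSum (x :: xs) = PySem.Str.len x + pvSum xs := by
  simp [pvSum]

theorem pvSum_append (xs ys : List String) :
    pvSum (xs ++ ys) = pvSum xs + pvSum ys := by
  simp [pvSum]

theorem pvSum_take_succ (lines : List String) (j : Nat) (hj : j < lines.length) :
    pvSum (lines.take (j+1)) = pvSum (lines.take j) + PySem.Str.len lines[j] := by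
  rw [List.take_succ, List.getElem?_eq_getElem hj]
  rw [show (some lines[j]).toList = [lines[j]] from rfl]
  rw [pvSum_append, pvSum_cons, pvSum_nil]
  ring

-- One unfolding step of A's while loop.
theorem pvAStep_succ (lines : List String) (fi : Int) (fuel : Nat) (el : Int) :
    pvAStep lines fi (fuel+1) el =
    if el < PySem.List.len lines then
      let line := PySem.List.pyGetD lines el ""
      if PySem.Str.strip line = "" ∨ PySem.Str.startswith (PySem.Str.strip line) "#" = true then
        pvAStep lines fi fuel (el + 1)
      else
        if PySem.Str.len line - PySem.Str.len (PySem.Str.lstrip line) ≤ fi ∧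
           PySem.Str.strip line ≠ "" then
          el
        else
          pvAStep lines fi fuel (el + 1)
    else el := rfl

-- A's range-sum equals the char count of the first m lines.
theorem pvASum_eq (lines : List String) (m : Nat) (hm : m ≤ lines.length) :
    pvASum lines (m : Int) = pvSum (lines.take m) := by
  induction m with
  | zero => simp [pvASum, pvSum, PySem.List.pyRange_one_eq_nil]
  | succ k ih =>
    have hk : k ≤ lines.length := by omega
    have hkl : k < lines.length := by omega
    have hsplit : PySem.List.pyRange 0 ((k+1 : Nat) : Int) 1 =
        PySem.List.pyRange 0 (k : Int) 1 ++ [(k : Int)] := by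
      push_cast
      exact PySem.List.pyRange_one_succ_right (by positivity)
    have hgd : PySem.List.pyGetD lines (k : Int) "" = lines[k] := by
      rw [PySem.List.pyGetD_natCast]
      simp [List.getD, List.getElem?_eq_getElem hkl]
    rw [pvASum] at ih ⊢
    rw [hsplit, List.foldl_append, ih hk, List.foldl_cons, List.foldl_nil, hgd,
      pvSum_take_succ lines k hkl]

-- Phase 2: past start_line, B's accumulating pass agrees with A's while loop:
-- the loop stops at some e with j ≤ e ≤ len, and B's pos has grown by the chars of lines j..e-1.
theorem pvPhase2 (lines : List String) (sl fi : Int) :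
    ∀ (rest : List String) (j : Nat) (sp pos : Int),
      rest = lines.drop j → j ≤ lines.length → sl < (j : Int) →
      ∃ e : Nat, j ≤ e ∧ e ≤ lines.length ∧
        pvAStep lines fi rest.length (j : Int) = (e : Int) ∧
        pvBLoop sl fi (PySem.List.enumerate rest (j : Int)) sp pos =
          (sp, pos + pvSum ((lines.drop j).take (e - j))) := by
  intro rest
  induction rest with
  | nil =>
    intro j sp pos hdrop hjn hsl
    refine ⟨j, le_refl _, hjn, rfl, ?_⟩
    simp [PySem.List.enumerate, pvBLoop, pvSum, ← hdrop]
  | cons line rest' ih =>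
    intro j sp pos hdrop hjn hsl
    have hdropcons : lines.drop j = line :: rest' := hdrop.symm
    have hget : lines[j]? = some line := by
      have h0 : (lines.drop j)[0]? = lines[j+0]? := List.getElem?_drop
      rw [hdropcons] at h0
      simpa using h0.symm
    have hjlt : j < lines.length := (List.getElem?_eq_some_iff.mp hget).1
    have hdrop' : rest' = lines.drop (j+1) := by
      have h1 : (lines.drop j).tail = lines.drop (j+1) := List.tail_drop
      rw [hdropcons] at h1
      simpa using h1
    have hdc2 : lines.drop j = line :: lines.drop (j+1) := by
      rw [hdropcons, hdrop']
    have hcond : ((j : Int)) < PySem.List.len lines := by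
      rw [PySem.List.len_eq]; exact_mod_cast hjlt
    have hgd : PySem.List.pyGetD lines ((j : Int)) "" = line := by
      rw [PySem.List.pyGetD_natCast]
      simp [List.getD, hget]
    have hcast : ((j : Int)) + 1 = (((j+1 : Nat)) : Int) := by push_cast; ring
    have hlen : (line :: rest').length = rest'.length + 1 := rfl
    by_cases hskip : PySem.Str.strip line = "" ∨ PySem.Str.startswith (PySem.Str.strip line) "#" = true
    · -- blank or comment line: both sides continue
      obtain ⟨e, he1, he2, hA, hB⟩ := ih (j+1) sp (pos + PySem.Str.len line) hdrop' (by omega) (by push_cast; omega)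
      refine ⟨e, by omega, he2, ?_, ?_⟩
      · rw [hlen, pvAStep_succ, if_pos hcond]
        simp only [hgd]
        rw [if_pos hskip, hcast, hA]
      · rw [PySem.List.enumerate_cons, pvBLoop, if_neg (by omega), if_neg (by omega)]
        have hnb : ¬ (PySem.Str.strip line ≠ "" ∧ PySem.Str.startswith (PySem.Str.strip line) "#" = false) := by
          rcases hskip with h | h
          · intro hc; exact hc.1 h
          · intro hc; rw [hc.2] at h; exact Bool.false_ne_true h
        rw [if_neg hnb, hcast, hB, hdc2]
        have hstep : e - j = (e - (j+1)) + 1 := by omega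
        rw [hstep, List.take_succ_cons, pvSum_cons]
        ring_nf
    · have hne : PySem.Str.strip line ≠ "" := fun h => hskip (Or.inl h)
      have hnh : ¬ PySem.Str.startswith (PySem.Str.strip line) "#" = true := fun h => hskip (Or.inr h)
      have hnh' : PySem.Str.startswith (PySem.Str.strip line) "#" = false := by
        cases h : PySem.Str.startswith (PySem.Str.strip line) "#"
        · rfl
        · exact absurd h hnh
      by_cases hind : PySem.Str.len line - PySem.Str.len (PySem.Str.lstrip line) ≤ fi
      · -- code line at function level or above: both sides stop here
        refine ⟨j, le_refl _, by omega, ?_, ?_⟩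
        · rw [hlen, pvAStep_succ, if_pos hcond]
          simp only [hgd]
          rw [if_neg hskip, if_pos ⟨hind, hne⟩]
        · rw [PySem.List.enumerate_cons, pvBLoop, if_neg (by omega), if_neg (by omega),
            if_pos ⟨hne, hnh'⟩, if_pos hind]
          simp [pvSum]
      · -- more-indented code line: both sides continue
        obtain ⟨e, he1, he2, hA, hB⟩ := ih (j+1) sp (pos + PySem.Str.len line) hdrop' (by omega) (by push_cast; omega)
        refine ⟨e, by omega, he2, ?_, ?_⟩
        · rw [hlen, pvAStep_succ, if_pos hcond]
          simp only [hgd]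
          rw [if_neg hskip, if_neg (fun hc => hind hc.1), hcast, hA]
        · rw [PySem.List.enumerate_cons, pvBLoop, if_neg (by omega), if_neg (by omega),
            if_pos ⟨hne, hnh'⟩, if_neg hind, hcast, hB, hdc2]
          have hstep : e - j = (e - (j+1)) + 1 := by omega
          rw [hstep, List.take_succ_cons, pvSum_cons]
          ring_nf

-- Phase 1: up to start_line, B only accumulates pos (and records start_pos at start_line).
theorem pvPhase1 (lines : List String) (fi : Int) (s : Nat) (hs : s < lines.length) :
    ∀ (k j : Nat) (sp : Int), j + k = s + 1 → j ≤ s →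
      pvBLoop (s : Int) fi (PySem.List.enumerate (lines.drop j) (j : Int)) sp (pvSum (lines.take j)) =
      pvBLoop (s : Int) fi (PySem.List.enumerate (lines.drop (s+1)) ((s+1 : Nat) : Int))
        (pvSum (lines.take s)) (pvSum (lines.take (s+1))) := by
  intro k
  induction k with
  | zero => intro j sp hjk hjs; omega
  | succ m ih =>
    intro j sp hjk hjs
    have hjlt : j < lines.length := by omega
    have hdropcons : lines.drop j = lines[j] :: lines.drop (j+1) :=
      List.drop_eq_getElem_cons hjlt
    have htake := pvSum_take_succ lines j hjlt
    have hcast : ((j : Int)) + 1 = (((j+1 : Nat)) : Int) := by push_cast; ring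
    rw [hdropcons, PySem.List.enumerate_cons]
    by_cases hj : j < s
    · rw [pvBLoop, if_pos (by exact_mod_cast hj), hcast, ← htake]
      exact ih (j+1) sp (by omega) (by omega)
    · have hjs' : j = s := by omega
      subst hjs'
      rw [pvBLoop, if_neg (by omega), if_pos rfl, hcast, ← htake]

theorem pvTakeSplit (lines : List String) (j e : Nat) (hje : j ≤ e) :
    pvSum (lines.take e) = pvSum (lines.take j) + pvSum ((lines.drop j).take (e - j)) := by
  conv_lhs => rw [show e = j + (e - j) by omega]
  rw [List.take_add, pvSum_append]

-- ===== VERDICT (by name: the statement is the Claim_ definition above) =====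
theorem find_function_end_regex_spec : Claim_equal_find_function_end_regex := by
  intro lines start_line function_indent _hdom hpre
  obtain ⟨h0, hlt⟩ := hpre
  rw [PySem.List.len_eq] at hlt
  obtain ⟨s, rfl⟩ : ∃ s : Nat, start_line = (s : Int) := ⟨start_line.toNat, (Int.toNat_of_nonneg h0).symm⟩
  have hs : s < lines.length := by exact_mod_cast hlt
  simp only [Spec_find_function_end_regex, find_function_end_regex, find_function_end_regex_alt]
  have hfuel : (PySem.List.len lines - ((s : Int) + 1)).toNat = (lines.drop (s+1)).length := by
    rw [PySem.List.len_eq, List.length_drop]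
    omega
  have hcast : (s : Int) + 1 = (((s+1 : Nat)) : Int) := by push_cast; ring
  obtain ⟨e, he1, he2, hA, hB⟩ := pvPhase2 lines (s : Int) function_indent
    (lines.drop (s+1)) (s+1) (pvSum (lines.take s)) (pvSum (lines.take (s+1)))
    rfl (by omega) (by push_cast; omega)
  have hB0 : pvBLoop (s : Int) function_indent (PySem.List.enumerate lines 0) 0 0 =
      (pvSum (lines.take s), pvSum (lines.take (s+1)) + pvSum ((lines.drop (s+1)).take (e - (s+1)))) := by
    have h1 := pvPhase1 lines function_indent s hs (s+1) 0 0 (by omega) (by omega)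
    simp only [List.drop_zero, List.take_zero, pvSum_nil, Nat.cast_zero] at h1
    rw [h1, hB]
  rw [hfuel, hcast, hA, hB0]
  have hse : pvSum (lines.take e) =
      pvSum (lines.take (s+1)) + pvSum ((lines.drop (s+1)).take (e - (s+1))) :=
    pvTakeSplit lines (s+1) e he1
  rw [pvASum_eq lines s (by omega), pvASum_eq lines e he2, hse]
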